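-- pv_equiv track=rewrite | github.com/official-panen138/Seo-nexus | backend/services/conflict_metrics_service.py | _group_by_field
-- ===== SOURCE A (Python) =====
-- from typing import Dict, Any, List, Optional
--
-- def _group_by_field(
--
--     conflicts: List[Dict],
--     field: str,
--     resolved_conflicts: List[Dict]
-- ) -> Dict[str, Dict]:
--     """Group conflicts by a field and count totals/resolved."""
--     result = {}
--
--     # Build set of resolved IDs for quick lookup
--     resolved_ids = {c["id"] for c in resolved_conflicts}
--
--     for conflict in conflicts:
--         value = conflict.get(field, "unknown")
--         if value not in result:
--             result[value] = {"total": 0, "resolved": 0}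
--         result[value]["total"] += 1
--         if conflict["id"] in resolved_ids:
--             result[value]["resolved"] += 1
--
--     return result
-- ===== SOURCE B (Python) =====
-- def _group_by_field(conflicts, field, resolved_conflicts):
--     """Group conflicts by a field and count totals/resolved (two independent tally passes)."""
--     resolved_ids = {c["id"] for c in resolved_conflicts}
--     keys = [c.get(field, "unknown") for c in conflicts]
--     resolved_keys = [k for c, k in zip(conflicts, keys) if c["id"] in resolved_ids]
--     totals = {}
--     for k in keys:
--         totals[k] = totals.get(k, 0) + 1
--     resolved = {}
--     for k in resolved_keys:
--         resolved[k] = resolved.get(k, 0) + 1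
--     return {k: {"total": t, "resolved": resolved.get(k, 0)} for k, t in totals.items()}
-- ===== Notes on version B (the rewrite author's own statement) =====
-- stated objective: alternative
-- what changed: Replaces A's single interleaved loop that conditionally creates and mutates nested per-key count dicts with two independent flat tallies (a totals counter over all field values and a resolved counter over the values of resolved conflicts, obtained by a zip-filter pass) merged in one final pass over the totals counter.
-- outside the precondition, e.g. on _group_by_field([{'x': '1'}], 'x', []): A raises KeyError, B raises KeyError
import Mathlib
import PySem

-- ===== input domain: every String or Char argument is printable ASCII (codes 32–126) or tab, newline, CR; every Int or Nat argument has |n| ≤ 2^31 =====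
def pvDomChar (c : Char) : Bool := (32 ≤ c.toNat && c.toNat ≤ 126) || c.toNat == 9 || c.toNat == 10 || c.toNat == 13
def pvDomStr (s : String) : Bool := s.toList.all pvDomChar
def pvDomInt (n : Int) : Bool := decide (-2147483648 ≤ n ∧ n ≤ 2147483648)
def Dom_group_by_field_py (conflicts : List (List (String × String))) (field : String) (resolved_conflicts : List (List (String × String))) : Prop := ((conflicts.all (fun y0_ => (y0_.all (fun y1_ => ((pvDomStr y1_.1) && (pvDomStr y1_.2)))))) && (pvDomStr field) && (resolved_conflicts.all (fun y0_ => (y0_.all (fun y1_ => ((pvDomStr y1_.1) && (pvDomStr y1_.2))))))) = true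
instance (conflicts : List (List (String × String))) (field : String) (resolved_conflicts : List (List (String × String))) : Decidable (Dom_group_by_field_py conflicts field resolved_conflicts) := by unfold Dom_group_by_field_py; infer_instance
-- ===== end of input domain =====

-- B replaces A's single interleaved loop over a dict of nested count-dicts by two independent
-- tally passes (a totals counter and a resolved counter) merged in one final pass (objective: alternative).

-- ===== PORT A =====
-- loop body of A's 'for conflict in conflicts' loop, as a named helper
def pvStepA (field : String) (resolved_ids : PySem.Set String)
    (result : PySem.Dict String (PySem.Dict String Int)) (conflict : List (String × String)) :
    PySem.Dict String (PySem.Dict String Int) :=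
  let value := (List.lookup field conflict).getD "unknown"
  let result :=
    if result.contains value then result
    else result.insert value (PySem.Dict.ofList [("total", 0), ("resolved", 0)])
  let result := result.modify value PySem.Dict.empty (fun d => d.modify "total" 0 (· + 1))
  if PySem.Set.contains resolved_ids ((List.lookup "id" conflict).getD "") then
    result.modify value PySem.Dict.empty (fun d => d.modify "resolved" 0 (· + 1))
  else result

def group_by_field_py (conflicts : List (List (String × String))) (field : String) (resolved_conflicts : List (List (String × String))) : List (String × List (String × Int)) :=
  let resolved_ids : PySem.Set String :=
    PySem.Set.ofList (resolved_conflicts.map (fun c => (List.lookup "id" c).getD ""))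
  let result := conflicts.foldl (pvStepA field resolved_ids) PySem.Dict.empty
  result.items.map (fun p => (p.1, p.2.items))

-- ===== PORT B =====
def group_by_field_py_alt (conflicts : List (List (String × String))) (field : String) (resolved_conflicts : List (List (String × String))) : List (String × List (String × Int)) :=
  let resolved_ids : PySem.Set String :=
    PySem.Set.ofList (resolved_conflicts.map (fun c => (List.lookup "id" c).getD ""))
  let keys := conflicts.map (fun c => (List.lookup field c).getD "unknown")
  let resolved_keys := ((conflicts.zip keys).filter
      (fun p => PySem.Set.contains resolved_ids ((List.lookup "id" p.1).getD ""))).map (fun p => p.2)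
  let totals : PySem.Dict String Int :=
    keys.foldl (fun d k => d.insert k (d.getD k 0 + 1)) PySem.Dict.empty
  let resolved : PySem.Dict String Int :=
    resolved_keys.foldl (fun d k => d.insert k (d.getD k 0 + 1)) PySem.Dict.empty
  totals.items.map (fun p => (p.1, [("total", p.2), ("resolved", resolved.getD p.1 0)]))

-- ===== PRECONDITION & SPEC =====
-- Pre_ excludes exactly the inputs on which some conflict dict (in either list) lacks an "id"
-- key: there the Python A raises KeyError (and so does B).
def Pre_group_by_field_py (conflicts : List (List (String × String))) (field : String) (resolved_conflicts : List (List (String × String))) : Prop :=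
  (∀ c ∈ conflicts, (List.lookup "id" c).isSome = true) ∧
  (∀ c ∈ resolved_conflicts, (List.lookup "id" c).isSome = true)
instance (conflicts : List (List (String × String))) (field : String) (resolved_conflicts : List (List (String × String))) : Decidable (Pre_group_by_field_py conflicts field resolved_conflicts) := by unfold Pre_group_by_field_py; infer_instance

def pvWitness_group_by_field_py : (List (List (String × String))) × String × (List (List (String × String))) :=
  ([[("id", "1"), ("f", "x")], [("id", "2")]], "f", [[("id", "2")]])

def Spec_group_by_field_py (conflicts : List (List (String × String))) (field : String) (resolved_conflicts : List (List (String × String))) (out : List (String × List (String × Int))) : Prop := out = group_by_field_py_alt conflicts field resolved_conflicts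
instance (conflicts : List (List (String × String))) (field : String) (resolved_conflicts : List (List (String × String))) (out : List (String × List (String × Int))) : Decidable (Spec_group_by_field_py conflicts field resolved_conflicts out) := by unfold Spec_group_by_field_py; infer_instance

-- ===== CLAIM (what is proved, stated in full; the proofs are below) =====
def Claim_equal_group_by_field_py : Prop := ∀ (conflicts : List (List (String × String))) (field : String) (resolved_conflicts : List (List (String × String))), Dom_group_by_field_py conflicts field resolved_conflicts → Pre_group_by_field_py conflicts field resolved_conflicts → Spec_group_by_field_py conflicts field resolved_conflicts (group_by_field_py conflicts field resolved_conflicts)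

-- ===== LEMMAS AND PROOFS =====

-- the inner Python dict {"total": t, "resolved": r}
def pvInner (t r : Int) : PySem.Dict String Int := PySem.Dict.mk [("total", t), ("resolved", r)]

-- A's accumulator after processing conflicts whose key list is ks and resolved-key list is rs
def pvMk (ks rs : List String) : PySem.Dict String (PySem.Dict String Int) :=
  PySem.Dict.mk ((PySem.Set.ofList ks).map (fun v => (v, pvInner (ks.count v) (rs.count v))))

lemma pv_find_self (S : List String) (k : String) :
    S.find? (fun v => v == k) = if k ∈ S then some k else none := by
  induction S with
  | nil => simp
  | cons a S ih =>
    by_cases h : a = k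
    · subst h; simp
    · simp [beq_iff_eq, h, ih, List.mem_cons, Ne.symm h]

lemma pv_contains_mapmk (S : List String) (h : String → PySem.Dict String Int) (k : String) :
    (PySem.Dict.mk (S.map (fun v => (v, h v)))).contains k = decide (k ∈ S) := by
  simp only [PySem.Dict.contains, List.any_map, Function.comp_def]
  induction S with
  | nil => simp
  | cons a S ih =>
    by_cases h : a = k
    · subst h; simp
    · simp [List.any_cons, beq_iff_eq, h, ih, List.mem_cons, Ne.symm h]

lemma pv_getD_mapmk (S : List String) (h : String → PySem.Dict String Int) (k : String)
    (d : PySem.Dict String Int) :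
    (PySem.Dict.mk (S.map (fun v => (v, h v)))).getD k d = if k ∈ S then h k else d := by
  simp [PySem.Dict.getD, PySem.Dict.get?, List.find?_map, Function.comp_def, pv_find_self]
  split <;> simp

lemma pv_insert_mapmk_of_not_mem (S : List String) (h : String → PySem.Dict String Int)
    (k : String) (x : PySem.Dict String Int) (hk : k ∉ S) :
    (PySem.Dict.mk (S.map (fun v => (v, h v)))).insert k x =
      PySem.Dict.mk ((S ++ [k]).map (fun v => (v, if v = k then x else h v))) := by
  apply PySem.Dict.ext
  rw [PySem.Dict.items_insert_of_not_contains _ _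
    (by rw [pv_contains_mapmk]; simp [hk])]
  rw [List.map_append]
  congr 1
  · exact List.map_congr_left (fun v hv => by
      rw [if_neg (fun hvk : v = k => hk (hvk ▸ hv))])
  · simp

lemma pv_modify_mapmk (S : List String) (h : String → PySem.Dict String Int) (k : String)
    (d0 : PySem.Dict String Int) (f : PySem.Dict String Int → PySem.Dict String Int) (hk : k ∈ S) :
    (PySem.Dict.mk (S.map (fun v => (v, h v)))).modify k d0 f =
      PySem.Dict.mk (S.map (fun v => (v, if v = k then f (h k) else h v))) := by
  apply PySem.Dict.ext
  rw [PySem.Dict.modify, pv_getD_mapmk, if_pos hk,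
    PySem.Dict.items_insert_of_contains _ _ (by rw [pv_contains_mapmk]; simp [hk])]
  simp only [List.map_map]
  exact List.map_congr_left (fun v _ => by by_cases hvk : v = k <;> simp [hvk])

lemma pv_inner_total (t r : Int) :
    (pvInner t r).modify "total" 0 (· + 1) = pvInner (t + 1) r := by
  apply PySem.Dict.ext
  simp [pvInner, PySem.Dict.modify, PySem.Dict.insert, PySem.Dict.contains, PySem.Dict.getD,
    PySem.Dict.get?]

lemma pv_inner_resolved (t r : Int) :
    (pvInner t r).modify "resolved" 0 (· + 1) = pvInner t (r + 1) := by
  apply PySem.Dict.ext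
  simp [pvInner, PySem.Dict.modify, PySem.Dict.insert, PySem.Dict.contains, PySem.Dict.getD,
    PySem.Dict.get?]

lemma pvStepA_mk (field : String) (rids : PySem.Set String) (ks rs : List String)
    (c : List (String × String)) (hrs : ∀ x ∈ rs, x ∈ ks) :
    pvStepA field rids (pvMk ks rs) c =
      pvMk (ks ++ [(List.lookup field c).getD "unknown"])
        (rs ++ (if PySem.Set.contains rids ((List.lookup "id" c).getD "")
                then [(List.lookup field c).getD "unknown"] else [])) := by
  set k := (List.lookup field c).getD "unknown" with hkdef
  have hof : PySem.Set.ofList (ks ++ [k]) = PySem.Set.add (PySem.Set.ofList ks) k := by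
    simp [PySem.Set.ofList, List.foldl_append]
  by_cases hk : k ∈ ks
  · -- key already present: no insert, the entry at k is updated in place
    have hkS : k ∈ PySem.Set.ofList ks := (PySem.Set.mem_ofList ks k).2 hk
    have hSeq : PySem.Set.ofList (ks ++ [k]) = PySem.Set.ofList ks := by
      rw [hof, PySem.Set.add_of_mem hkS]
    have hcont : (PySem.Dict.mk ((PySem.Set.ofList ks).map
        (fun v => (v, pvInner (ks.count v : Int) (rs.count v : Int))))).contains k = true :=
      (pv_contains_mapmk _ _ _).trans (by simp [hk])
    unfold pvStepA pvMk
    rw [← hkdef]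
    by_cases hres : PySem.Set.contains rids ((List.lookup "id" c).getD "") = true
    · rw [if_pos hres, if_pos hres, if_pos hcont, pv_modify_mapmk _ _ _ _ _ hkS,
        pv_inner_total, pv_modify_mapmk _ _ _ _ _ hkS, if_pos rfl, pv_inner_resolved, hSeq]
      refine congrArg PySem.Dict.mk (List.map_congr_left (fun v hv => ?_))
      by_cases hvk : v = k
      · subst hvk; simp [pvInner, List.count_append]
      · simp [hvk, pvInner, List.count_append, List.count_eq_zero]
    · rw [if_neg hres, if_neg hres, if_pos hcont, pv_modify_mapmk _ _ _ _ _ hkS,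
        pv_inner_total, hSeq]
      refine congrArg PySem.Dict.mk (List.map_congr_left (fun v hv => ?_))
      by_cases hvk : v = k
      · subst hvk; simp [pvInner, List.count_append]
      · simp [hvk, pvInner, List.count_append, List.count_eq_zero]
  · -- new key: appended at the end with fresh counts
    have hkS : k ∉ PySem.Set.ofList ks := fun h => hk ((PySem.Set.mem_ofList ks k).1 h)
    have hkrs : k ∉ rs := fun h => hk (hrs k h)
    have hSeq : PySem.Set.ofList (ks ++ [k]) = PySem.Set.ofList ks ++ [k] := by
      rw [hof, PySem.Set.add_of_not_mem hkS]
    have hofl : (PySem.Dict.ofList [("total", (0:Int)), ("resolved", 0)]) = pvInner 0 0 := rfl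
    have hmem : k ∈ PySem.Set.ofList ks ++ [k] := by simp
    have hcont : (PySem.Dict.mk ((PySem.Set.ofList ks).map
        (fun v => (v, pvInner (ks.count v : Int) (rs.count v : Int))))).contains k = false :=
      (pv_contains_mapmk _ _ _).trans (by simp [hk])
    unfold pvStepA pvMk
    rw [← hkdef]
    by_cases hres : PySem.Set.contains rids ((List.lookup "id" c).getD "") = true
    · rw [if_pos hres, if_pos hres, if_neg (by rw [hcont]; simp), hofl,
        pv_insert_mapmk_of_not_mem _ _ _ _ hkS, pv_modify_mapmk _ _ _ _ _ hmem, if_pos rfl,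
        pv_inner_total, pv_modify_mapmk _ _ _ _ _ hmem, if_pos rfl, pv_inner_resolved, hSeq]
      refine congrArg PySem.Dict.mk (List.map_congr_left (fun v hv => ?_))
      by_cases hvk : v = k
      · subst hvk
        simp [pvInner, List.count_append, List.count_eq_zero_of_not_mem hk,
          List.count_eq_zero_of_not_mem hkrs]
      · simp [hvk, pvInner, List.count_append, List.count_eq_zero]
    · rw [if_neg hres, if_neg hres, if_neg (by rw [hcont]; simp), hofl,
        pv_insert_mapmk_of_not_mem _ _ _ _ hkS, pv_modify_mapmk _ _ _ _ _ hmem, if_pos rfl,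
        pv_inner_total, hSeq]
      refine congrArg PySem.Dict.mk (List.map_congr_left (fun v hv => ?_))
      by_cases hvk : v = k
      · subst hvk
        simp [pvInner, List.count_append, List.count_eq_zero_of_not_mem hk,
          List.count_eq_zero_of_not_mem hkrs]
      · simp [hvk, pvInner, List.count_append, List.count_eq_zero]

lemma pvFoldA (field : String) (rids : PySem.Set String) (l : List (List (String × String)))
    (ks rs : List String) (hrs : ∀ x ∈ rs, x ∈ ks) :
    l.foldl (pvStepA field rids) (pvMk ks rs) =
      pvMk (ks ++ l.map (fun c => (List.lookup field c).getD "unknown"))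
        (rs ++ ((l.filter (fun c => PySem.Set.contains rids ((List.lookup "id" c).getD ""))).map
          (fun c => (List.lookup field c).getD "unknown"))) := by
  induction l generalizing ks rs with
  | nil => simp
  | cons c l ih =>
    rw [List.foldl_cons, pvStepA_mk field rids ks rs c hrs, List.filter_cons, List.map_cons]
    by_cases hres : PySem.Set.contains rids ((List.lookup "id" c).getD "") = true
    · rw [if_pos hres, if_pos hres, List.map_cons,
        ih (ks ++ [(List.lookup field c).getD "unknown"])
           (rs ++ [(List.lookup field c).getD "unknown"])
           (by intro x hx
               rcases List.mem_append.1 hx with h | h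
               · exact List.mem_append.2 (Or.inl (hrs x h))
               · exact List.mem_append.2 (Or.inr h))]
      simp [List.append_assoc]
    · rw [if_neg hres, if_neg hres, List.append_nil,
        ih (ks ++ [(List.lookup field c).getD "unknown"]) rs
           (fun x hx => List.mem_append.2 (Or.inl (hrs x hx)))]
      simp [List.append_assoc]

lemma pvZipFilterMap (conflicts : List (List (String × String))) (field : String)
    (rids : PySem.Set String) :
    (((conflicts.zip (conflicts.map (fun c => (List.lookup field c).getD "unknown"))).filter
        (fun p => PySem.Set.contains rids ((List.lookup "id" p.1).getD ""))).map (fun p => p.2)) =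
      (conflicts.filter (fun c => PySem.Set.contains rids ((List.lookup "id" c).getD ""))).map
        (fun c => (List.lookup field c).getD "unknown") := by
  induction conflicts with
  | nil => rfl
  | cons c l ih =>
    rw [List.map_cons, List.zip_cons_cons, List.filter_cons, List.filter_cons]
    by_cases hres : PySem.Set.contains rids ((List.lookup "id" c).getD "") = true
    · rw [if_pos hres, if_pos hres, List.map_cons, List.map_cons, ih]
    · rw [if_neg hres, if_neg hres, ih]

-- ===== VERDICT (by name: the statement is the Claim_ definition above) =====
theorem group_by_field_py_spec : Claim_equal_group_by_field_py := by
  intro conflicts field resolved_conflicts _ _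
  unfold Spec_group_by_field_py group_by_field_py group_by_field_py_alt
  dsimp only
  set rids := PySem.Set.ofList (resolved_conflicts.map (fun c => (List.lookup "id" c).getD ""))
  have h0 : (PySem.Dict.empty : PySem.Dict String (PySem.Dict String Int)) = pvMk [] [] := rfl
  rw [h0, pvFoldA field rids conflicts [] [] (by simp), pvZipFilterMap,
    PySem.Dict.foldl_insert_getD_add_one_eq_counter,
    PySem.Dict.foldl_insert_getD_add_one_eq_counter, PySem.Dict.items_counter]
  simp only [pvMk, List.map_map, List.nil_append]
  exact List.map_congr_left (fun v _ => by
    simp [pvInner, PySem.Dict.getD_counter])
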